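-- pv_equiv track=rewrite | github.com/htooayelwinict/attalang | src/multi_agent/trajectory/collector.py | _is_error_output
-- ===== SOURCE A (Python) =====
-- from typing import Any, Optional
--
-- def _is_error_output(output: Any) -> bool:
--     if not output:
--         return False
--     text = str(output).lower()
--     return any(p in text for p in (
--         "error:", "error (exit", "failed", "timeout",
--         '"success": false', "'success': false",
--     ))
-- ===== SOURCE B (Python) =====
-- _MARKERS = (
--     "error:", "error (exit", "failed", "timeout",
--     '"success": false', "'success': false",
-- )
--
-- def _is_error_output(output) -> bool:
--     # Single left-to-right scan: at each position test whether any marker starts there,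
--     # instead of six independent substring scans.
--     if not output:
--         return False
--     text = str(output).lower()
--     for i in range(len(text)):
--         for m in _MARKERS:
--             if text.startswith(m, i):
--                 return True
--     return False
-- ===== Notes on version B (the rewrite author's own statement) =====
-- stated objective: alternative
-- what changed: Replaces the six independent substring-containment scans over the lowered text with one left-to-right pass that tests, at each position, whether any marker starts there.
import Mathlib
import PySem

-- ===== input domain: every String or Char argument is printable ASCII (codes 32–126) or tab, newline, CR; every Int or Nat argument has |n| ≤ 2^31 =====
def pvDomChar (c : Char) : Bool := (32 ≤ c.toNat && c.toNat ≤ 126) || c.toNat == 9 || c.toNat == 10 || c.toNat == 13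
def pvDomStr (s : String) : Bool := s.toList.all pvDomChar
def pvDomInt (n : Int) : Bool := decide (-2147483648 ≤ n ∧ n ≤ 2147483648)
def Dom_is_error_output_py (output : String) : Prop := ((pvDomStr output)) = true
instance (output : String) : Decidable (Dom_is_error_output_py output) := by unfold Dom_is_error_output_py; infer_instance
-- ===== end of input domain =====

-- B replaces six independent substring scans with one left-to-right pass testing each
-- marker at each position (objective: alternative, same result).

-- ===== PORT A =====
def is_error_output_py (output : String) : Bool :=
  if output == "" then false
  else
    let text := PySem.Str.lower output
    ([ "error:", "error (exit", "failed", "timeout",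
       "\"success\": false", "'success': false" ] : List String).any
      (fun p => PySem.Str.isIn p text)

-- ===== PORT B =====
def pvMarkers : List (List Char) :=
  [ "error:".toList, "error (exit".toList, "failed".toList, "timeout".toList,
    "\"success\": false".toList, "'success': false".toList ]

-- the single scan of Source B: at each position, does some marker start here?
def pvScan : List Char → Bool
  | [] => false
  | c :: t => pvMarkers.any (fun m => PySem.Chars.startswith (c :: t) m) || pvScan t

def is_error_output_py_alt (output : String) : Bool :=
  if output == "" then false
  else pvScan (PySem.Chars.lower output.toList)

-- ===== PRECONDITION & SPEC =====
def Spec_is_error_output_py (output : String) (out : Bool) : Prop := out = is_error_output_py_alt output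
instance (output : String) (out : Bool) : Decidable (Spec_is_error_output_py output out) := by unfold Spec_is_error_output_py; infer_instance

-- ===== CLAIM (what is proved, stated in full; the proofs are below) =====
def Claim_equal_is_error_output_py : Prop := ∀ (output : String), Dom_is_error_output_py output → Spec_is_error_output_py output (is_error_output_py output)

-- ===== LEMMAS AND PROOFS =====

lemma pvScan_true_iff (cs : List Char) :
    pvScan cs = true ↔ ∃ m ∈ pvMarkers, ∃ j, m <+: cs.drop j := by
  induction cs with
  | nil =>
      simp only [pvScan, List.drop_nil]
      constructor
      · intro h; exact absurd h (by decide)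
      · rintro ⟨m, hm, j, hp⟩
        have : m = [] := List.prefix_nil.mp hp
        subst this
        exact absurd hm (by decide)
  | cons c t ih =>
      simp only [pvScan, Bool.or_eq_true, List.any_eq_true, ih]
      constructor
      · rintro (⟨m, hm, hs⟩ | ⟨m, hm, j, hp⟩)
        · exact ⟨m, hm, 0, (PySem.Chars.startswith_iff _ _).mp hs⟩
        · exact ⟨m, hm, j + 1, by simpa using hp⟩
      · rintro ⟨m, hm, j, hp⟩
        cases j with
        | zero => exact Or.inl ⟨m, hm, (PySem.Chars.startswith_iff _ _).mpr (by simpa using hp)⟩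
        | succ j => exact Or.inr ⟨m, hm, j, by simpa using hp⟩

lemma pvScan_eq_any (cs : List Char) :
    pvScan cs = pvMarkers.any (fun m => PySem.Chars.isIn m cs) := by
  rw [Bool.eq_iff_iff, pvScan_true_iff, List.any_eq_true]
  constructor
  · rintro ⟨m, hm, j, hp⟩
    exact ⟨m, hm, (PySem.Chars.exists_prefix_drop_iff_isIn _ _).mp ⟨j, hp⟩⟩
  · rintro ⟨m, hm, h⟩
    obtain ⟨j, hp⟩ := (PySem.Chars.exists_prefix_drop_iff_isIn _ _).mpr h
    exact ⟨m, hm, j, hp⟩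

-- ===== VERDICT (by name: the statement is the Claim_ definition above) =====
theorem is_error_output_py_spec : Claim_equal_is_error_output_py := by
  intro output _
  unfold Spec_is_error_output_py is_error_output_py is_error_output_py_alt
  by_cases h : output = ""
  · simp [h]
  · rw [if_neg (by simpa using h), if_neg (by simpa using h), pvScan_eq_any]
    simp [pvMarkers, PySem.Str.isIn, PySem.Str.lower]
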